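-- pv_equiv track=rewrite | github.com/muiremoraes/art-theft-application | encoded_images/main.py | get_4_bits_from_bytearray
-- ===== SOURCE A (Python) =====
-- def get_4_bits_from_bytearray(byteArray, blockIndex):
--     byteIndex = blockIndex // 2 #every bytes is 2 blocks
--
--     if byteIndex >= len(byteArray): #if block index is bigger than message repeat message for watermark all over image
--         byteIndex = byteIndex % len(byteArray)
--
--     byte = byteArray[byteIndex] #get the bytes for the block
--
--     if blockIndex % 2 == 0: #checks and takes high bits
--         offset = 4
--     else:
--         offset = 0 #checks and takes low bits
--
--     bits = []
--     for i in range(3, -1, -1):# get 4 bits msb to lsb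
--         #check if each bit is 1  or 0 convert to True/False
--         bits.append(bool((byte >> (offset + i)) & 1)) # convert to boolean
--
--     return bits
-- ===== SOURCE B (Python) =====
-- _NIBBLE_BITS = [
--     [False, False, False, False], [False, False, False, True],
--     [False, False, True, False],  [False, False, True, True],
--     [False, True, False, False],  [False, True, False, True],
--     [False, True, True, False],   [False, True, True, True],
--     [True, False, False, False],  [True, False, False, True],
--     [True, False, True, False],   [True, False, True, True],
--     [True, True, False, False],   [True, True, False, True],
--     [True, True, True, False],    [True, True, True, True],
-- ]
--
-- def get_4_bits_from_bytearray(byteArray, blockIndex):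
--     byte = byteArray[(blockIndex // 2) % len(byteArray)]
--     nibble = (byte >> 4 if blockIndex % 2 == 0 else byte) & 0xF
--     return list(_NIBBLE_BITS[nibble])
-- ===== Notes on version B (the rewrite author's own statement) =====
-- stated objective: simpler
-- what changed: Replaces A's per-bit shift-and-mask loop (range(3,-1,-1) with append) by extracting the whole nibble at once and looking its bit pattern up in a precomputed 16-entry table, and folds A's conditional index wrap into a single modulo.
import Mathlib
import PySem

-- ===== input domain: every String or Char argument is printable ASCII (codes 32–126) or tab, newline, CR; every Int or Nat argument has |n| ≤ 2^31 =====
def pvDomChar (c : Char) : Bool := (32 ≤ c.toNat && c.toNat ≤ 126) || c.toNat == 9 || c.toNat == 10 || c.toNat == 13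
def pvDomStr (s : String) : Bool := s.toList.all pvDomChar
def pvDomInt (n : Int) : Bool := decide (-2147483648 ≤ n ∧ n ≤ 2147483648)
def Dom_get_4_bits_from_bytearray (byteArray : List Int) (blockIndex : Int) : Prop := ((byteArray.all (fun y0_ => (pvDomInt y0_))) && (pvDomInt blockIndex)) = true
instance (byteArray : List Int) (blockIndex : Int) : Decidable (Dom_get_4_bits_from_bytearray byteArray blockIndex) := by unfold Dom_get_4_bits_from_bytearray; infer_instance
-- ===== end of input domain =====

-- B replaces A's per-bit shift-and-mask loop by one nibble extraction plus a 16-entry lookup table,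
-- and folds A's conditional index wrap into a single modulo (objective: simpler).

-- ===== PORT A =====
def get_4_bits_from_bytearray (byteArray : List Int) (blockIndex : Int) : List Bool :=
  let byteIndex := PySem.Int.floordiv blockIndex 2
  let byteIndex :=
    if (byteArray.length : Int) ≤ byteIndex then
      PySem.Int.mod byteIndex (byteArray.length : Int)
    else byteIndex
  -- byteArray[byteIndex]: IndexError (pyGet? = none) excluded by Pre_
  let byte := PySem.List.pyGetD byteArray byteIndex 0
  let offset : Int := if PySem.Int.mod blockIndex 2 = 0 then 4 else 0
  (PySem.List.pyRange 3 (-1) (-1)).foldl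
    (fun bits i => bits ++ [decide (PySem.Int.band (byte >>> (offset + i).toNat) 1 ≠ 0)]) []

-- ===== PORT B =====
def pvNibbleBits : List (List Bool) :=
  [ [false, false, false, false], [false, false, false, true],
    [false, false, true, false],  [false, false, true, true],
    [false, true, false, false],  [false, true, false, true],
    [false, true, true, false],   [false, true, true, true],
    [true, false, false, false],  [true, false, false, true],
    [true, false, true, false],   [true, false, true, true],
    [true, true, false, false],   [true, true, false, true],
    [true, true, true, false],    [true, true, true, true] ]

def get_4_bits_from_bytearray_alt (byteArray : List Int) (blockIndex : Int) : List Bool :=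
  let byte := PySem.List.pyGetD byteArray
    (PySem.Int.mod (PySem.Int.floordiv blockIndex 2) (byteArray.length : Int)) 0
  let nibble := PySem.Int.band
    (if PySem.Int.mod blockIndex 2 = 0 then byte >>> (4 : Nat) else byte) 15
  PySem.List.pyGetD pvNibbleBits nibble []

-- ===== PRECONDITION & SPEC =====
-- Pre_ is exactly where the Python A returns: a nonempty bytearray (else ZeroDivisionError on
-- `byteIndex % len`), and blockIndex ≥ -2*len (else blockIndex//2 < -len and byteArray[byteIndex]
-- raises IndexError).
def Pre_get_4_bits_from_bytearray (byteArray : List Int) (blockIndex : Int) : Prop :=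
  byteArray ≠ [] ∧ -(2 * (byteArray.length : Int)) ≤ blockIndex
instance (byteArray : List Int) (blockIndex : Int) : Decidable (Pre_get_4_bits_from_bytearray byteArray blockIndex) := by unfold Pre_get_4_bits_from_bytearray; infer_instance

def pvWitness_get_4_bits_from_bytearray : List Int × Int := ([171], 0)

def Spec_get_4_bits_from_bytearray (byteArray : List Int) (blockIndex : Int) (out : List Bool) : Prop := out = get_4_bits_from_bytearray_alt byteArray blockIndex
instance (byteArray : List Int) (blockIndex : Int) (out : List Bool) : Decidable (Spec_get_4_bits_from_bytearray byteArray blockIndex out) := by unfold Spec_get_4_bits_from_bytearray; infer_instance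

-- ===== CLAIM (what is proved, stated in full; the proofs are below) =====
def Claim_equal_get_4_bits_from_bytearray : Prop := ∀ (byteArray : List Int) (blockIndex : Int), Dom_get_4_bits_from_bytearray byteArray blockIndex → Pre_get_4_bits_from_bytearray byteArray blockIndex → Spec_get_4_bits_from_bytearray byteArray blockIndex (get_4_bits_from_bytearray byteArray blockIndex)
-- ===== LEMMAS AND PROOFS =====

-- q & 15 is q mod 16 (Python semantics, all integers)
theorem pv_band_fifteen (q : Int) : PySem.Int.band q 15 = q % 16 := by
  have hn : ∀ m : Nat, m &&& 15 = m % 16 := by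
    intro m
    have := Nat.and_two_pow_sub_one_eq_mod m 4
    norm_num at this; omega
  have h15 : Int.toNat 15 = 15 := rfl
  rcases q with m | m
  · simp only [PySem.Int.band]
    norm_num
    rw [h15, hn m]
    omega
  · simp only [PySem.Int.band]
    norm_num
    rw [h15, Nat.and_comm 15 m, hn m, Int.negSucc_eq]
    omega

-- indexing with A's conditionally wrapped index equals indexing with the plain modulo
theorem pv_idx_eq (xs : List Int) (k : Int) (hne : xs ≠ []) (hk : -(xs.length : Int) ≤ k) :
    PySem.List.pyGetD xs (if (xs.length : Int) ≤ k then PySem.Int.mod k (xs.length : Int) else k) 0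
      = PySem.List.pyGetD xs (PySem.Int.mod k (xs.length : Int)) 0 := by
  have hlen : 0 < (xs.length : Int) := by
    have := List.length_pos_iff.mpr hne; exact_mod_cast this
  by_cases h : (xs.length : Int) ≤ k
  · simp [h]
  · simp only [h, if_false]
    rw [PySem.Int.mod_eq_emod_of_pos hlen]
    have hmod0 : 0 ≤ k % (xs.length : Int) := Int.emod_nonneg k (by omega)
    have hmodlt : k % (xs.length : Int) < (xs.length : Int) := Int.emod_lt_of_pos k hlen
    simp only [PySem.List.pyGetD, PySem.List.pyGet?, PySem.List.pyIdx?]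
    by_cases h0 : 0 ≤ k
    · have : k % (xs.length : Int) = k := Int.emod_eq_of_lt h0 (by omega)
      rw [this]
    · have hke : k % (xs.length : Int) = k + xs.length := by
        have h1 : (k + (xs.length : Int)) % (xs.length : Int) = k % (xs.length : Int) := by
          have := Int.add_mul_emod_self_left (a := k) (b := (xs.length : Int)) (c := 1)
          rwa [mul_one] at this
        rw [← h1]
        exact Int.emod_eq_of_lt (by omega) (by omega)
      simp only [h0, if_false, hmod0, if_true, hmodlt, if_true, hk, if_true]
      have h2 : xs.length - (-k).toNat = (k % (xs.length : Int)).toNat := by omega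
      rw [h2]

-- the four extracted bits of q, MSB first, are the table row of q's low nibble
theorem pv_bits_table (q : Int) :
    ([] : List Bool)
        ++ [decide (PySem.Int.band (q >>> (3 : Nat)) 1 ≠ 0)]
        ++ [decide (PySem.Int.band (q >>> (2 : Nat)) 1 ≠ 0)]
        ++ [decide (PySem.Int.band (q >>> (1 : Nat)) 1 ≠ 0)]
        ++ [decide (PySem.Int.band (q >>> (0 : Nat)) 1 ≠ 0)]
      = PySem.List.pyGetD pvNibbleBits (PySem.Int.band q 15) [] := by
  rw [pv_band_fifteen]
  have hb : ∀ x : Int, PySem.Int.band x 1 = x % 2 := by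
    intro x
    rw [PySem.Int.band_one, PySem.Int.mod_eq_emod_of_pos (by norm_num)]
  simp only [hb, Int.shiftRight_eq_div_pow]
  norm_num
  set r := q % 16 with hr
  have h0 : 0 ≤ r := Int.emod_nonneg q (by norm_num)
  have h1 : r < 16 := Int.emod_lt_of_pos q (by norm_num)
  have e3 : q / 8 % 2 = r / 8 % 2 := by omega
  have e2 : q / 4 % 2 = r / 4 % 2 := by omega
  have e1 : q / 2 % 2 = r / 2 % 2 := by omega
  have e0 : q % 2 = r % 2 := by omega
  rw [e3, e2, e1, e0]
  interval_cases r <;> decide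

-- extracting bits at offsets off+3..off+0 is extracting bits 3..0 of byte >> off
theorem pv_loop (byte : Int) (off : Nat) :
    ([] : List Bool)
        ++ [decide (PySem.Int.band (byte >>> (off + 3)) 1 ≠ 0)]
        ++ [decide (PySem.Int.band (byte >>> (off + 2)) 1 ≠ 0)]
        ++ [decide (PySem.Int.band (byte >>> (off + 1)) 1 ≠ 0)]
        ++ [decide (PySem.Int.band (byte >>> (off + 0)) 1 ≠ 0)]
      = PySem.List.pyGetD pvNibbleBits (PySem.Int.band (byte >>> off) 15) [] := by
  simp only [Int.shiftRight_add]
  exact pv_bits_table (byte >>> off)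

-- ===== VERDICT (by name: the statement is the Claim_ definition above) =====
theorem get_4_bits_from_bytearray_spec : Claim_equal_get_4_bits_from_bytearray := by
  intro xs bi _ hpre
  obtain ⟨hne, hbi⟩ := hpre
  unfold Spec_get_4_bits_from_bytearray get_4_bits_from_bytearray get_4_bits_from_bytearray_alt
  dsimp only
  have hk : -(xs.length : Int) ≤ PySem.Int.floordiv bi 2 := by
    rw [PySem.Int.le_floordiv_iff_mul_le (by norm_num)]
    omega
  rw [pv_idx_eq xs _ hne hk]
  set byte := PySem.List.pyGetD xs (PySem.Int.mod (PySem.Int.floordiv bi 2) (xs.length : Int)) 0 with hbyte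
  rw [show PySem.List.pyRange 3 (-1) (-1) = [3, 2, 1, 0] from by decide]
  simp only [List.foldl]
  by_cases hpar : PySem.Int.mod bi 2 = 0
  · simp only [hpar, if_true]
    have h := pv_loop byte 4
    norm_num at h ⊢
    exact h
  · simp only [hpar, if_false]
    have h := pv_loop byte 0
    norm_num at h ⊢
    exact h
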